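-- pv_equiv track=rewrite | github.com/jesus1497/Algoritmo_Kata | src/kata.py | cuatro_palabras_a_codigo
-- ===== SOURCE A (Python) =====
-- def letras_a_codigo(palabras, limite_letras_palabra):
--     return palabras[:limite_letras_palabra].upper()
--
-- def cuatro_palabras_a_codigo(palabras):
--     palabras = palabras.split()
--     codigo = ""
--     longitud_palabras = len(palabras)
--     limite_letras_palabra = 1
--     for i in range(longitud_palabras):
--         auxiliar = palabras[i].split("-")
--         longitud_auxiliar = len(auxiliar)
--         for j in range(longitud_auxiliar):
--             codigo = codigo + letras_a_codigo(auxiliar[j], limite_letras_palabra)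
--     return codigo
-- ===== SOURCE B (Python) =====
-- def cuatro_palabras_a_codigo(palabras):
--     # Normalize separators: hyphens become whitespace, then one flat split + join.
--     return "".join(w[:1].upper() for w in palabras.replace("-", " ").split())
-- ===== Notes on version B (the rewrite author's own statement) =====
-- stated objective: simpler
-- what changed: Replaces the nested outer-word/inner-hyphen index loops (plus the letras_a_codigo helper) by first normalizing hyphens into spaces and then doing a single split-map-join pass over the flat token list.
import Mathlib
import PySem

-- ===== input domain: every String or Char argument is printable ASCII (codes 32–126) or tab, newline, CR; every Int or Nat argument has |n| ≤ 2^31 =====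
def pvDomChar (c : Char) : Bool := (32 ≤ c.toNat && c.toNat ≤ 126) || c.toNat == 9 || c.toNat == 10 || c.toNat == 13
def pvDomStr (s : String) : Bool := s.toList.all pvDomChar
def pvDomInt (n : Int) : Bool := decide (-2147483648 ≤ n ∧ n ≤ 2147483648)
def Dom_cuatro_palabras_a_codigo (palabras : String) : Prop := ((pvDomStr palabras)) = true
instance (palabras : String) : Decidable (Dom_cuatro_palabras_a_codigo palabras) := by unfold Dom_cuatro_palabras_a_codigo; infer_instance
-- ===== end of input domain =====

-- B replaces A's nested outer-word/inner-hyphen index loops by normalizing hyphens into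
-- spaces and doing one split-map-join pass (objective: simpler).

-- ===== PORT A =====
def letras_a_codigo (palabras : String) (limite_letras_palabra : Int) : String :=
  PySem.Str.upper (PySem.Str.slice palabras none (some limite_letras_palabra))

def cuatro_palabras_a_codigo (palabras : String) : String :=
  let palabrasL : List String := PySem.Str.split₀ palabras
  let longitud_palabras : Int := PySem.List.len palabrasL
  let limite_letras_palabra : Int := 1
  (PySem.List.pyRange 0 longitud_palabras).foldl (fun codigo i =>
    -- palabras[i].split("-"): sep "-" ≠ "", ported exactly via Chars.splitOn on the code points
    let auxiliar : List String :=
      (PySem.Chars.splitOn (PySem.List.pyGetD palabrasL i "").toList ['-']).map String.ofList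
    let longitud_auxiliar : Int := PySem.List.len auxiliar
    (PySem.List.pyRange 0 longitud_auxiliar).foldl (fun codigo j =>
      codigo ++ letras_a_codigo (PySem.List.pyGetD auxiliar j "") limite_letras_palabra) codigo) ""

-- ===== PORT B =====
def cuatro_palabras_a_codigo_alt (palabras : String) : String :=
  PySem.Str.join ""
    ((PySem.Str.split₀ (PySem.Str.replace palabras "-" " ")).map
      (fun w => PySem.Str.upper (PySem.Str.slice w none (some 1))))

-- ===== PRECONDITION & SPEC =====
def Spec_cuatro_palabras_a_codigo (palabras : String) (out : String) : Prop := out = cuatro_palabras_a_codigo_alt palabras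
instance (palabras : String) (out : String) : Decidable (Spec_cuatro_palabras_a_codigo palabras out) := by unfold Spec_cuatro_palabras_a_codigo; infer_instance

-- ===== CLAIM (what is proved, stated in full; the proofs are below) =====
def Claim_equal_cuatro_palabras_a_codigo : Prop := ∀ (palabras : String), Dom_cuatro_palabras_a_codigo palabras → Spec_cuatro_palabras_a_codigo palabras (cuatro_palabras_a_codigo palabras)

-- ===== LEMMAS AND PROOFS =====

-- separator predicates and the hyphen→space substitution
def pvSp (c : Char) : Bool := PySem.Chars.isspace c
def pvHy (c : Char) : Bool := c == '-'
def pvSh (c : Char) : Bool := pvSp c || pvHy c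
def pvSub (c : Char) : Char := if c == '-' then ' ' else c

-- first letter of a piece, uppercased (what w[:1].upper() computes)
def pvF (w : List Char) : List Char := PySem.Chars.upper (w.take 1)

-- maximal runs of non-separator chars (what str.split() computes for p = isspace)
def pvTokens (p : Char → Bool) : List Char → List (List Char)
  | [] => []
  | c :: t =>
    if p c then pvTokens p t
    else (c :: t.takeWhile (fun x => !p x)) :: pvTokens p (t.dropWhile (fun x => !p x))
termination_by l => l.length
decreasing_by
  all_goals (have h1 := List.length_dropWhile_le (fun x => !p x) t; simp; try omega)

-- segments between hyphens, empties kept (what w.split("-") computes)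
def pvSegs : List Char → List (List Char)
  | [] => [[]]
  | c :: t => if c = '-' then [] :: pvSegs t else (pvSegs t).modifyHead (c :: ·)

def pvSegsTail : List Char → List (List Char)
  | [] => []
  | _ :: r => pvSegs r

-- the common spec: one char scan emitting the uppercased first letter of each q-free run
def pvCode (q : Char → Bool) : List Char → List Char
  | [] => []
  | c :: t =>
    if q c then pvCode q t
    else PySem.Chars.upperChar c :: pvCode q (t.dropWhile (fun x => !q x))
termination_by l => l.length
decreasing_by
  all_goals (have h1 := List.length_dropWhile_le (fun x => !q x) t; simp; try omega)

-- replace with one-char old/new is a map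
theorem pvReplace_go (l : List Char) : ∀ (fuel : Nat) (acc : List Char), l.length ≤ fuel →
    PySem.Chars.replace.go ['-'] [' '] fuel l acc = acc.reverse ++ l.map pvSub := by
  induction l with
  | nil => intro fuel acc _; cases fuel <;> simp [PySem.Chars.replace.go]
  | cons c t ih =>
    intro fuel acc hf
    cases fuel with
    | zero => simp at hf
    | succ f =>
      have ht : t.length ≤ f := by simp at hf; omega
      by_cases hc : c = '-'
      · subst hc
        have hpre : List.isPrefixOf ['-'] ('-' :: t) = true := by simp [List.isPrefixOf]
        rw [PySem.Chars.replace.go, if_pos hpre]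
        rw [show List.drop (['-'] : List Char).length ('-' :: t) = t from rfl]
        rw [show ([' '] : List Char).reverse ++ acc = ' ' :: acc from rfl]
        rw [ih f (' ' :: acc) ht]
        simp [pvSub]
      · have hpre : List.isPrefixOf ['-'] (c :: t) = false := by
          simp [List.isPrefixOf]
          exact fun h => hc h.symm
        rw [PySem.Chars.replace.go, if_neg (by simp [hpre])]
        rw [ih f (c :: acc) ht]
        simp [pvSub, hc]

theorem pvReplace_eq_map (l : List Char) :
    PySem.Chars.replace l ['-'] [' '] = l.map pvSub := by
  rw [PySem.Chars.replace, if_neg (by simp)]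
  exact pvReplace_go l l.length [] le_rfl

-- split() is pvTokens pvSp
theorem pvSplit0_go (l : List Char) : ∀ (cur : List Char) (acc : List (List Char)),
    PySem.Chars.split₀.go l cur acc = acc.reverse ++
      (if cur = [] then pvTokens pvSp l
       else (cur.reverse ++ l.takeWhile (fun x => !pvSp x)) ::
            pvTokens pvSp (l.dropWhile (fun x => !pvSp x))) := by
  induction l with
  | nil =>
    intro cur acc
    cases cur <;> simp [PySem.Chars.split₀.go, pvTokens]
  | cons c t ih =>
    intro cur acc
    by_cases hc : PySem.Chars.isspace c
    · rw [PySem.Chars.split₀.go, if_pos hc]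
      have htk : (c :: t).takeWhile (fun x => !pvSp x) = [] :=
        List.takeWhile_cons_of_neg (by simp [pvSp, hc])
      have hdr : (c :: t).dropWhile (fun x => !pvSp x) = c :: t :=
        List.dropWhile_cons_of_neg (by simp [pvSp, hc])
      have htok : pvTokens pvSp (c :: t) = pvTokens pvSp t := by
        rw [pvTokens, if_pos (by simpa [pvSp] using hc)]
      cases cur with
      | nil => rw [if_pos (by simp), ih [] acc]; simp [htok]
      | cons d ds =>
        rw [if_neg (by simp), ih [] (((d :: ds).reverse) :: acc)]
        rw [if_pos rfl, htk, hdr, htok]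
        simp
    · rw [PySem.Chars.split₀.go, if_neg hc, ih (c :: cur) acc, if_neg (by simp)]
      have htk : (c :: t).takeWhile (fun x => !pvSp x) = c :: t.takeWhile (fun x => !pvSp x) :=
        List.takeWhile_cons_of_pos (by simp [pvSp, hc])
      have hdr : (c :: t).dropWhile (fun x => !pvSp x) = t.dropWhile (fun x => !pvSp x) :=
        List.dropWhile_cons_of_pos (by simp [pvSp, hc])
      cases cur with
      | nil =>
        rw [if_pos rfl, pvTokens, if_neg (by simpa [pvSp] using hc)]
        simp
      | cons d ds => rw [if_neg (by simp), htk, hdr]; simp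

theorem pvSplit0_eq_tokens (l : List Char) :
    PySem.Chars.split₀ l = pvTokens pvSp l := by
  simpa using pvSplit0_go l [] []

-- split("-") is pvSegs
theorem pvSegs_eq (t : List Char) :
    pvSegs t = t.takeWhile (fun x => !pvHy x) :: pvSegsTail (t.dropWhile (fun x => !pvHy x)) := by
  induction t with
  | nil => simp [pvSegs, pvSegsTail]
  | cons c t ih =>
    by_cases hc : c = '-'
    · subst hc
      rw [pvSegs, if_pos rfl]
      simp [List.takeWhile_cons, List.dropWhile_cons, pvHy, pvSegsTail]
    · rw [pvSegs, if_neg hc, ih]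
      simp [List.takeWhile_cons, List.dropWhile_cons, pvHy, hc]

theorem pvSplitOn_go (l : List Char) : ∀ (fuel : Nat) (cur : List Char) (acc : List (List Char)),
    l.length < fuel →
    PySem.Chars.splitOn.go ['-'] fuel l cur acc =
      acc.reverse ++ (pvSegs l).modifyHead (cur.reverse ++ ·) := by
  induction l with
  | nil =>
    intro fuel cur acc hf
    cases fuel with
    | zero => omega
    | succ f => simp [PySem.Chars.splitOn.go, pvSegs]
  | cons c t ih =>
    intro fuel cur acc hf
    cases fuel with
    | zero => omega
    | succ f =>
      have ht : t.length < f := by simp at hf; omega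
      by_cases hc : c = '-'
      · subst hc
        have hpre : List.isPrefixOf ['-'] ('-' :: t) = true := by simp [List.isPrefixOf]
        rw [PySem.Chars.splitOn.go, if_pos hpre]
        rw [show List.drop (['-'] : List Char).length ('-' :: t) = t from rfl]
        rw [ih f [] (cur.reverse :: acc) ht, pvSegs, if_pos rfl]
        cases pvSegs t <;> simp
      · have hpre : List.isPrefixOf ['-'] (c :: t) = false := by
          simp [List.isPrefixOf]
          exact fun h => hc h.symm
        rw [PySem.Chars.splitOn.go, if_neg (by simp [hpre])]
        rw [ih f (c :: cur) acc ht, pvSegs, if_neg hc]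
        cases pvSegs t <;> simp

theorem pvSplitOn_eq_segs (l : List Char) :
    PySem.Chars.splitOn l ['-'] = pvSegs l := by
  have h := pvSplitOn_go l (l.length + 1) [] [] (by omega)
  have h2 : List.modifyHead (fun x => [].reverse ++ x) (pvSegs l) = pvSegs l := by
    cases pvSegs l <;> simp
  rw [PySem.Chars.splitOn]
  rw [h]; simpa using h2

-- flatMap of pvF over q-tokens is the scan pvCode q
theorem pvTokens_flatMap_f (q : Char → Bool) (l : List Char) :
    (pvTokens q l).flatMap pvF = pvCode q l := by
  induction l using pvTokens.induct q with
  | case1 => simp [pvTokens, pvCode]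
  | case2 c t hq ih => rw [pvTokens, if_pos hq, pvCode, if_pos hq]; exact ih
  | case3 c t hq ih =>
    rw [pvTokens, if_neg hq, pvCode, if_neg hq]
    simp [pvF, PySem.Chars.upper, ih]

-- head of a dropWhile fails the predicate
theorem pvDropWhile_head (p : Char → Bool) (l : List Char) (d : Char) (r : List Char)
    (h : l.dropWhile p = d :: r) : p d = false := by
  induction l with
  | nil => simp at h
  | cons c t ih =>
    by_cases hc : p c
    · rw [List.dropWhile_cons_of_pos hc] at h; exact ih h
    · rw [List.dropWhile_cons_of_neg hc] at h
      cases h; simpa using hc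

-- flatMap of pvF over hyphen segments (empties included) is pvCode pvHy
theorem pvSegs_flatMap_f : ∀ (n : Nat) (l : List Char), l.length ≤ n →
    (pvSegs l).flatMap pvF = pvCode pvHy l := by
  intro n
  induction n with
  | zero =>
    intro l hl
    rw [List.length_eq_zero_iff.mp (Nat.le_zero.mp hl)]
    simp [pvSegs, pvCode, pvF, PySem.Chars.upper]
  | succ n ih =>
    intro l hl
    cases l with
    | nil => simp [pvSegs, pvCode, pvF, PySem.Chars.upper]
    | cons c t =>
      by_cases hc : c = '-'
      · subst hc
        rw [pvSegs, if_pos rfl, pvCode, if_pos (by simp [pvHy])]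
        simp only [List.flatMap_cons]
        rw [show pvF [] = [] from by simp [pvF, PySem.Chars.upper]]
        simp only [List.nil_append]
        exact ih t (by simp at hl; omega)
      · have hhy : pvHy c = false := by simp [pvHy, hc]
        rw [pvCode, if_neg (by simp [hhy])]
        rw [pvSegs, if_neg hc, pvSegs_eq t]
        simp only [List.modifyHead_cons, List.flatMap_cons]
        rw [show pvF (c :: t.takeWhile (fun x => !pvHy x)) = [PySem.Chars.upperChar c] from by
          simp [pvF, PySem.Chars.upper]]
        simp only [List.singleton_append]
        congr 1
        cases hdr : t.dropWhile (fun x => !pvHy x) with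
        | nil => simp [pvSegsTail, pvCode]
        | cons d r =>
          have hd : pvHy d = true := by
            simpa using pvDropWhile_head (fun x => !pvHy x) t d r hdr
          rw [pvSegsTail, pvCode, if_pos hd]
          have hr : r.length ≤ n := by
            have h1 := List.length_dropWhile_le (fun x => !pvHy x) t
            rw [hdr] at h1
            simp at h1 hl; omega
          exact ih r hr

-- D/E pair: splicing a hyphen-scan of the space-free prefix into a pvSh-scan
theorem pvDE (t : List Char) :
    (pvCode pvHy (t.takeWhile (fun x => !pvSp x)) ++ pvCode pvSh (t.dropWhile (fun x => !pvSp x))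
       = pvCode pvSh t) ∧
    (pvCode pvHy ((t.takeWhile (fun x => !pvSp x)).dropWhile (fun x => !pvHy x))
       ++ pvCode pvSh (t.dropWhile (fun x => !pvSp x))
       = pvCode pvSh (t.dropWhile (fun x => !pvSh x))) := by
  induction t with
  | nil => simp [pvCode]
  | cons c t ih =>
    by_cases hsp : pvSp c
    · have htw : List.takeWhile (fun x => !pvSp x) (c :: t) = [] := by
        rw [List.takeWhile_cons]; simp [hsp]
      have hdw : List.dropWhile (fun x => !pvSp x) (c :: t) = c :: t := by
        rw [List.dropWhile_cons]; simp [hsp]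
      have hdwsh : List.dropWhile (fun x => !pvSh x) (c :: t) = c :: t := by
        rw [List.dropWhile_cons]; simp [pvSh, hsp]
      refine ⟨?_, ?_⟩
      · rw [htw, hdw]; simp [pvCode]
      · rw [htw, hdw, hdwsh]; simp [pvCode]
    · have htw : List.takeWhile (fun x => !pvSp x) (c :: t)
          = c :: List.takeWhile (fun x => !pvSp x) t := by
        rw [List.takeWhile_cons]; simp [hsp]
      have hdw : List.dropWhile (fun x => !pvSp x) (c :: t)
          = List.dropWhile (fun x => !pvSp x) t := by
        rw [List.dropWhile_cons]; simp [hsp]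
      by_cases hhy : pvHy c
      · have hsh : pvSh c = true := by simp [pvSh, hhy]
        have hdwhy : List.dropWhile (fun x => !pvHy x) (c :: List.takeWhile (fun x => !pvSp x) t)
            = c :: List.takeWhile (fun x => !pvSp x) t := by
          rw [List.dropWhile_cons]; simp [hhy]
        have hdwsh : List.dropWhile (fun x => !pvSh x) (c :: t) = c :: t := by
          rw [List.dropWhile_cons]; simp [hsh]
        have hcodeHy : pvCode pvHy (c :: List.takeWhile (fun x => !pvSp x) t)
            = pvCode pvHy (List.takeWhile (fun x => !pvSp x) t) := by
          rw [pvCode, if_pos hhy]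
        have hcodeSh : pvCode pvSh (c :: t) = pvCode pvSh t := by
          rw [pvCode, if_pos hsh]
        refine ⟨?_, ?_⟩
        · rw [htw, hdw, hcodeHy, hcodeSh]; exact ih.1
        · rw [htw, hdw, hdwhy, hdwsh, hcodeHy, hcodeSh]; exact ih.1
      · have hsh : pvSh c = false := by simp [pvSh, hsp, hhy]
        have hdwhy : List.dropWhile (fun x => !pvHy x) (c :: List.takeWhile (fun x => !pvSp x) t)
            = List.dropWhile (fun x => !pvHy x) (List.takeWhile (fun x => !pvSp x) t) := by
          rw [List.dropWhile_cons]; simp [hhy]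
        have hdwsh : List.dropWhile (fun x => !pvSh x) (c :: t)
            = List.dropWhile (fun x => !pvSh x) t := by
          rw [List.dropWhile_cons]; simp [hsh]
        have hcodeHy : pvCode pvHy (c :: List.takeWhile (fun x => !pvSp x) t)
            = PySem.Chars.upperChar c ::
                pvCode pvHy ((List.takeWhile (fun x => !pvSp x) t).dropWhile (fun x => !pvHy x)) := by
          rw [pvCode, if_neg hhy]
        have hcodeSh : pvCode pvSh (c :: t)
            = PySem.Chars.upperChar c :: pvCode pvSh (List.dropWhile (fun x => !pvSh x) t) := by
          rw [pvCode, if_neg (by simp [hsh])]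
        refine ⟨?_, ?_⟩
        · rw [htw, hdw, hcodeHy, hcodeSh, List.cons_append]
          exact congrArg (PySem.Chars.upperChar c :: ·) ih.2
        · rw [htw, hdw, hdwhy, hdwsh]
          exact ih.2

-- composing the two scans: hyphen-scan inside each space-token is the pvSh-scan
theorem pvTokens_flatMap_code (l : List Char) :
    (pvTokens pvSp l).flatMap (pvCode pvHy) = pvCode pvSh l := by
  induction l using pvTokens.induct pvSp with
  | case1 => simp [pvTokens, pvCode]
  | case2 c t hq ih =>
    rw [pvTokens, if_pos hq, pvCode, if_pos (by simp [pvSh, hq])]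
    exact ih
  | case3 c t hq ih =>
    rw [pvTokens, if_neg hq]
    simp only [List.flatMap_cons]
    rw [ih]
    by_cases hhy : pvHy c
    · rw [pvCode, if_pos hhy]
      conv_rhs => rw [pvCode]
      rw [if_pos (by simp [pvSh, hhy])]
      exact (pvDE t).1
    · rw [pvCode, if_neg hhy]
      conv_rhs => rw [pvCode]
      rw [if_neg (by simp [pvSh, hq, hhy])]
      rw [List.cons_append]
      congr 1
      exact (pvDE t).2

-- the hyphen→space substitution turns a pvSp-scan into a pvSh-scan
theorem pvCode_map_sub (l : List Char) :
    pvCode pvSp (l.map pvSub) = pvCode pvSh l := by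
  have hpred : ∀ c, pvSp (pvSub c) = pvSh c := by
    intro c
    by_cases hc : c = '-'
    · subst hc; decide
    · simp [pvSub, hc, pvSh, pvHy]
  induction l using pvCode.induct pvSh with
  | case1 => simp [pvCode]
  | case2 c t hq ih =>
    rw [List.map_cons, pvCode, if_pos (by rw [hpred]; exact hq)]
    conv_rhs => rw [pvCode]
    rw [if_pos hq]
    exact ih
  | case3 c t hq ih =>
    have hc' : c ≠ '-' := by
      intro h; subst h; simp [pvSh, pvHy] at hq
    have hsub : pvSub c = c := by simp [pvSub, hc']
    rw [List.map_cons, pvCode, if_neg (by rw [hpred]; exact hq)]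
    conv_rhs => rw [pvCode]
    rw [if_neg hq, hsub]
    congr 1
    rw [List.dropWhile_map]
    have : ((fun x => !pvSp x) ∘ pvSub) = (fun x => !pvSh x) := by
      funext x; simp [Function.comp, hpred]
    rw [this]
    exact ih

-- w[:1].upper() on the char level
theorem pvLetras_toList (w : String) :
    (PySem.Str.upper (PySem.Str.slice w none (some 1))).toList = pvF w.toList := by
  rw [PySem.Str.toList_upper, pvF]
  congr 1
  rw [PySem.Str.toList_slice, PySem.Chars.slice_eq_listSlice]
  rw [PySem.List.slice_to (xs := w.toList) (b := 1) (by norm_num)]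
  rfl

-- the inner loop of A, on the char level
theorem pvInner_glue (ps : List (List Char)) : ∀ (init : String),
    ((ps.map String.ofList).foldl
        (fun c p => c ++ letras_a_codigo p 1) init).toList =
      init.toList ++ ps.flatMap pvF := by
  induction ps with
  | nil => intro init; simp
  | cons p rest ih =>
    intro init
    rw [List.map_cons, List.foldl_cons, ih, List.flatMap_cons]
    rw [String.toList_append]
    rw [show (letras_a_codigo (String.ofList p) 1).toList = pvF p from by
      rw [letras_a_codigo]
      simpa using pvLetras_toList (String.ofList p)]
    simp

-- the outer loop of A, on the char level
theorem pvOuter_glue (ws : List (List Char)) : ∀ (init : String),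
    ((ws.map String.ofList).foldl
        (fun codigo w => ((PySem.Chars.splitOn w.toList ['-']).map String.ofList).foldl
          (fun c p => c ++ letras_a_codigo p 1) codigo) init).toList =
      init.toList ++ ws.flatMap (fun w => (pvSegs w).flatMap pvF) := by
  induction ws with
  | nil => intro init; simp
  | cons w rest ih =>
    intro init
    rw [List.map_cons, List.foldl_cons, ih, List.flatMap_cons]
    rw [show (String.ofList w).toList = w from String.toList_ofList]
    rw [pvSplitOn_eq_segs w, pvInner_glue]
    simp

-- A's value, on the char level
theorem pvA_toList (s : String) :
    (cuatro_palabras_a_codigo s).toList =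
      (pvTokens pvSp s.toList).flatMap (fun w => (pvSegs w).flatMap pvF) := by
  simp only [cuatro_palabras_a_codigo]
  have houter := PySem.List.foldl_pyRange_pyGetD (PySem.Str.split₀ s) ""
    (fun codigo w =>
      (PySem.List.pyRange 0 (PySem.List.len
          ((PySem.Chars.splitOn w.toList ['-']).map String.ofList))).foldl
        (fun c j => c ++ letras_a_codigo
          (PySem.List.pyGetD ((PySem.Chars.splitOn w.toList ['-']).map String.ofList) j "") 1)
        codigo)
    "" (a := 0) (by norm_num)
  rw [houter]
  rw [PySem.List.foldl_congr_mem _ _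
    (fun codigo w => ((PySem.Chars.splitOn w.toList ['-']).map String.ofList).foldl
      (fun c p => c ++ letras_a_codigo p 1) codigo) _
    (by
      intro acc w _
      have h := PySem.List.foldl_pyRange_pyGetD
        ((PySem.Chars.splitOn w.toList ['-']).map String.ofList) ""
        (fun c p => c ++ letras_a_codigo p 1) acc (a := 0) (by norm_num)
      simpa using h)]
  rw [show PySem.Str.split₀ s = (pvTokens pvSp s.toList).map String.ofList from by
    rw [PySem.Str.split₀, pvSplit0_eq_tokens]]
  rw [show ((0:Int).toNat) = 0 from rfl, List.drop_zero]
  have hglue := pvOuter_glue (pvTokens pvSp s.toList) ""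
  rw [hglue]
  simp

-- every l.intercalate goes away: "".join is flatten
theorem pvJoin_nil (ps : List (List Char)) : PySem.Chars.join [] ps = ps.flatten := by
  induction ps with
  | nil => simp [PySem.Chars.join, List.intercalate]
  | cons p rest ih =>
    cases rest with
    | nil => simp [PySem.Chars.join, List.intercalate]
    | cons q qs =>
      rw [PySem.Chars.join_cons_cons]
      rw [show PySem.Chars.join [] (q :: qs) = (q :: qs).flatten from ih]
      simp

-- B's value, on the char level
theorem pvB_toList (s : String) :
    (cuatro_palabras_a_codigo_alt s).toList =
      (pvTokens pvSp (s.toList.map pvSub)).flatMap pvF := by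
  rw [cuatro_palabras_a_codigo_alt, PySem.Str.join]
  rw [String.toList_ofList]
  rw [show ("" : String).toList = ([] : List Char) from rfl]
  rw [pvJoin_nil]
  rw [show (PySem.Str.replace s "-" " ") = String.ofList (s.toList.map pvSub) from by
    rw [PySem.Str.replace]
    congr 1
    exact pvReplace_eq_map s.toList]
  rw [PySem.Str.split₀, String.toList_ofList, pvSplit0_eq_tokens]
  rw [List.map_map, List.map_map]
  have hmap : ∀ w ∈ pvTokens pvSp (s.toList.map pvSub),
      ((String.toList ∘ fun w => PySem.Str.upper (PySem.Str.slice w none (some 1))) ∘ String.ofList) w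
        = pvF w := by
    intro w _
    simp only [Function.comp]
    rw [pvLetras_toList, String.toList_ofList]
  rw [List.map_congr_left hmap, ← List.flatMap_def]

-- ===== VERDICT (by name: the statement is the Claim_ definition above) =====
theorem cuatro_palabras_a_codigo_spec : Claim_equal_cuatro_palabras_a_codigo := by
  intro palabras _
  unfold Spec_cuatro_palabras_a_codigo
  apply String.toList_inj.mp
  rw [pvA_toList, pvB_toList]
  calc (pvTokens pvSp palabras.toList).flatMap (fun w => (pvSegs w).flatMap pvF)
      = (pvTokens pvSp palabras.toList).flatMap (pvCode pvHy) := by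
        apply List.flatMap_congr
        intro w _
        exact pvSegs_flatMap_f w.length w le_rfl
    _ = pvCode pvSh palabras.toList := pvTokens_flatMap_code palabras.toList
    _ = pvCode pvSp (palabras.toList.map pvSub) := (pvCode_map_sub palabras.toList).symm
    _ = (pvTokens pvSp (palabras.toList.map pvSub)).flatMap pvF :=
        (pvTokens_flatMap_f pvSp (palabras.toList.map pvSub)).symm
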